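-- pv_equiv track=rewrite | github.com/chromalock/CGBLinkVideo | scripts/encode/tile_encode.py | get_tile_indexes
-- ===== SOURCE A (Python) =====
-- def get_color_index(rgb, ncolors: int):
--     return 3 - int(round((sum(rgb)/(ncolors - 1))/255 * (ncolors - 1)))
--
-- def get_tile_indexes(frame):
--     # tile_index = bottom_right + bottom_left*4 + top_right*16 + top_left*64
--     indexes = [[0 for _ in range(20)] for _ in range(18)]
--     for y in range(len(frame)//2):
--         for x in range(len(frame[0])//2):
--             tl = get_color_index(frame[y*2][x*2], 4)
--             tr = get_color_index(frame[y*2][x*2+1], 4)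
--             bl = get_color_index(frame[y*2+1][x*2], 4)
--             br = get_color_index(frame[y*2+1][x*2+1], 4)
--             tile_index = br + bl * 4 + tr * 16 + tl * 64
--             indexes[y][x] = tile_index
--     return indexes
-- ===== SOURCE B (Python) =====
-- def get_color_index(rgb, ncolors: int):
--     return 3 - int(round((sum(rgb)/(ncolors - 1))/255 * (ncolors - 1)))
--
-- def get_tile_indexes(frame):
--     h = len(frame) // 2
--     w = len(frame[0]) // 2 if h else 0
--     # first pass: color index of every pixel the block loop touches
--     ci = [[get_color_index(frame[y][x], 4) for x in range(2 * w)]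
--           for y in range(2 * h)]
--     # second pass: combine each 2x2 block into one tile index
--     body = [[ci[2*y][2*x] * 64 + ci[2*y][2*x+1] * 16
--              + ci[2*y+1][2*x] * 4 + ci[2*y+1][2*x+1]
--              for x in range(w)]
--             for y in range(h)]
--     # pad to the fixed 18x20 grid
--     return ([row + [0] * (20 - w) for row in body]
--             + [[0] * 20 for _ in range(18 - h)])
-- ===== Notes on version B (the rewrite author's own statement) =====
-- stated objective: alternative
-- what changed: Replaces A's in-place mutation of a preallocated 18x20 grid inside nested index loops by two comprehension passes: first a per-pixel color-index grid, then a pass combining each 2x2 block, with the fixed-size grid produced by padding instead of mutation.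
import Mathlib
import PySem

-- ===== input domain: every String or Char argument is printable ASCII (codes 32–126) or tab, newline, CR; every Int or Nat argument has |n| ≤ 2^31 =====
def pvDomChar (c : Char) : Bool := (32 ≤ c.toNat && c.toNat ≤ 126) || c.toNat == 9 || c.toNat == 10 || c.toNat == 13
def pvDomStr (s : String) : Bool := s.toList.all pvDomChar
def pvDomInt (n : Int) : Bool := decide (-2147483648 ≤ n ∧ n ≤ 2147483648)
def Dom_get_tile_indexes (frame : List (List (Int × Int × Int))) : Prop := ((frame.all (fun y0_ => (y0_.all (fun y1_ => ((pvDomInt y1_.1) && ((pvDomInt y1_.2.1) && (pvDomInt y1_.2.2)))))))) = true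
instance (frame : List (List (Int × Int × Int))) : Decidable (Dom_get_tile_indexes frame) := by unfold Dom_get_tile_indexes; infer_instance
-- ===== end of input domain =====

-- B replaces A's in-place mutation of a preallocated 18x20 grid inside nested index loops
-- by two comprehension passes (per-pixel color grid, then 2x2 combination) plus padding;
-- same cost, different decomposition ("alternative").


-- ===== PORT A =====
-- get_color_index(rgb, 4) = 3 - int(round(((r+g+b)/3)/255*3)).  Hand-ported (PySem has no
-- floats) as exact integer arithmetic: 3 - (2*s+255)//510.  Exact on Dom: s/255 is never a
-- half-integer (255 is odd), its distance to the nearest half-integer is ≥ 1/510, while the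
-- accumulated double rounding error for |s| ≤ 3*2^31 is < 2e-8, so Python's round() of the
-- float equals the nearest integer to s/255, which is (2*s+255)//510 (floor division).
def pvGci (rgb : Int × Int × Int) : Int :=
  3 - PySem.Int.floordiv (2 * (rgb.1 + rgb.2.1 + rgb.2.2) + 255) 510

def get_tile_indexes (frame : List (List (Int × Int × Int))) : List (List Int) :=
  let indexes : List (List Int) := List.replicate 18 (List.replicate 20 (0 : Int))
  (List.range (frame.length / 2)).foldl (fun ind y =>
    (List.range ((frame.headD []).length / 2)).foldl (fun ind x =>
      let tl := pvGci ((frame.getD (y * 2) []).getD (x * 2) (0, 0, 0))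
      let tr := pvGci ((frame.getD (y * 2) []).getD (x * 2 + 1) (0, 0, 0))
      let bl := pvGci ((frame.getD (y * 2 + 1) []).getD (x * 2) (0, 0, 0))
      let br := pvGci ((frame.getD (y * 2 + 1) []).getD (x * 2 + 1) (0, 0, 0))
      ind.set y ((ind.getD y []).set x (br + bl * 4 + tr * 16 + tl * 64))) ind) indexes

-- ===== PORT B =====
def get_tile_indexes_alt (frame : List (List (Int × Int × Int))) : List (List Int) :=
  let h := frame.length / 2
  let w := if h = 0 then 0 else (frame.headD []).length / 2
  let ci := (List.range (2 * h)).map (fun y =>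
    (List.range (2 * w)).map (fun x => pvGci ((frame.getD y []).getD x (0, 0, 0))))
  let body := (List.range h).map (fun y =>
    (List.range w).map (fun x =>
      (ci.getD (2 * y) []).getD (2 * x) 0 * 64 + (ci.getD (2 * y) []).getD (2 * x + 1) 0 * 16
      + (ci.getD (2 * y + 1) []).getD (2 * x) 0 * 4 + (ci.getD (2 * y + 1) []).getD (2 * x + 1) 0))
  body.map (fun row => row ++ List.replicate (20 - w) (0 : Int))
    ++ List.replicate (18 - h) (List.replicate 20 (0 : Int))

-- ===== PRECONDITION & SPEC =====
-- Pre_ excludes exactly the inputs where A raises IndexError: a frame with 38+ rows or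
-- (when at least one block row exists) 42+ columns in row 0 overruns the fixed 18x20 grid,
-- and a touched row shorter than 2*(len(frame[0])//2) overruns that row.
def Pre_get_tile_indexes (frame : List (List (Int × Int × Int))) : Prop :=
  frame.length / 2 ≤ 18 ∧
  (2 ≤ frame.length →
    (frame.headD []).length / 2 ≤ 20 ∧
    ∀ row ∈ frame.take (2 * (frame.length / 2)),
      2 * ((frame.headD []).length / 2) ≤ row.length)
instance (frame : List (List (Int × Int × Int))) : Decidable (Pre_get_tile_indexes frame) := by
  unfold Pre_get_tile_indexes; infer_instance

def pvWitness_get_tile_indexes : (List (List (Int × Int × Int))) :=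
  [[(0, 0, 0), (765, 0, 0)], [(255, 255, 255), (128, 0, 0)]]

def Spec_get_tile_indexes (frame : List (List (Int × Int × Int))) (out : List (List Int)) : Prop := out = get_tile_indexes_alt frame
instance (frame : List (List (Int × Int × Int))) (out : List (List Int)) : Decidable (Spec_get_tile_indexes frame out) := by unfold Spec_get_tile_indexes; infer_instance

-- ===== CLAIM (what is proved, stated in full; the proofs are below) =====
def Claim_equal_get_tile_indexes : Prop := ∀ (frame : List (List (Int × Int × Int))), Dom_get_tile_indexes frame → Pre_get_tile_indexes frame → Spec_get_tile_indexes frame (get_tile_indexes frame)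

-- ===== LEMMAS AND PROOFS =====

-- setting slot k of a mapped-with-cutoff-k list to f k advances the cutoff to k+1
theorem pv_set_map_range {α : Type} (n k : Nat) (f : Nat → α) (z : α) (hk : k < n) :
    ((List.range n).map (fun i => if i < k then f i else z)).set k (f k)
      = (List.range n).map (fun i => if i < k + 1 then f i else z) := by
  apply List.ext_getElem
  · simp
  · intro i h1 h2
    simp only [List.getElem_set, List.getElem_map, List.getElem_range]
    split_ifs <;> first | rfl | omega | (subst_vars; rfl)

-- the inner write-loop on a fresh 20-slot row produces the mapped row
theorem pv_rowfold (v : Nat → Int) (k : Nat) (hk : k ≤ 20) :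
    (List.range k).foldl (fun r x => r.set x (v x)) (List.replicate 20 (0 : Int))
      = (List.range 20).map (fun x => if x < k then v x else 0) := by
  induction k with
  | zero => simp [List.map_const']
  | succ k ih =>
    rw [List.range_succ, List.foldl_append, ih (by omega)]
    simpa using pv_set_map_range 20 k v 0 (by omega)

-- the inner loop only touches row y: it factors through a row update
theorem pv_row_set (xs : List Nat) (v : Nat → Int) :
    ∀ (ind : List (List Int)) (y : Nat), y < ind.length →
    xs.foldl (fun ind x => ind.set y ((ind.getD y []).set x (v x))) ind
      = ind.set y (xs.foldl (fun r x => r.set x (v x)) (ind.getD y [])) := by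
  induction xs with
  | nil =>
    intro ind y hy
    simp only [List.foldl_nil]
    rw [List.getD_eq_getElem ind [] hy, List.set_getElem_self]
  | cons x xs ih =>
    intro ind y hy
    simp only [List.foldl_cons]
    rw [ih _ y (by simpa using hy), List.set_set]
    have hgd : (ind.set y ((ind.getD y []).set x (v x))).getD y []
        = (ind.getD y []).set x (v x) := by
      rw [List.getD_eq_getElem _ [] (by simpa using hy)]
      exact List.getElem_set_self (by simpa using hy)
    rw [hgd]

-- the full nested loop on the fresh 18x20 grid produces the mapped grid
theorem pv_gridfold (cellv : Nat → Nat → Int) (w : Nat) (hw : w ≤ 20) :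
    ∀ (k : Nat), k ≤ 18 →
    (List.range k).foldl (fun ind y =>
        (List.range w).foldl (fun ind x =>
          ind.set y ((ind.getD y []).set x (cellv y x))) ind)
      (List.replicate 18 (List.replicate 20 (0 : Int)))
      = (List.range 18).map (fun y => if y < k then
          (List.range 20).map (fun x => if x < w then cellv y x else 0)
        else List.replicate 20 (0 : Int)) := by
  intro k
  induction k with
  | zero => intro _; simp [List.map_const']
  | succ k ih =>
    intro hk
    rw [List.range_succ, List.foldl_append, ih (by omega)]
    simp only [List.foldl_cons, List.foldl_nil]
    rw [pv_row_set _ _ _ k (by simp; omega)]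
    rw [List.getD_eq_getElem _ [] (by simp; omega)]
    simp only [List.getElem_map, List.getElem_range]
    rw [if_neg (lt_irrefl k), pv_rowfold _ w hw]
    exact pv_set_map_range 18 k _ _ (by omega)

-- ===== VERDICT (by name: the statement is the Claim_ definition above) =====
theorem get_tile_indexes_spec : Claim_equal_get_tile_indexes := by
  intro frame _dom pre
  unfold Spec_get_tile_indexes get_tile_indexes get_tile_indexes_alt
  obtain ⟨h18, hcols⟩ := pre
  by_cases hh : frame.length / 2 = 0
  · simp [hh]
  · have h2 : 2 ≤ frame.length := by omega
    obtain ⟨hw20, -⟩ := hcols h2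
    simp only [if_neg hh]
    rw [pv_gridfold _ _ hw20 _ h18]
    apply List.ext_getElem
    · simp only [List.length_map, List.length_range, List.length_append,
        List.length_replicate]
      omega
    · intro i h1 h2'
      simp only [List.getElem_map, List.getElem_range]
      by_cases hi : i < frame.length / 2
      · rw [List.getElem_append_left (by simpa using hi), if_pos hi]
        simp only [List.getElem_map, List.getElem_range]
        apply List.ext_getElem
        · simp only [List.length_map, List.length_range, List.length_append,
            List.length_replicate]
          omega
        · intro j j1 j2
          simp only [List.getElem_map, List.getElem_range]
          by_cases hj : j < (frame.headD []).length / 2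
          · rw [List.getElem_append_left (by simpa using hj), if_pos hj]
            simp only [List.getElem_map, List.getElem_range]
            rw [PySem.List.getD_map_range _ _ (2 * i) _ (by omega),
                PySem.List.getD_map_range _ _ (2 * i + 1) _ (by omega),
                PySem.List.getD_map_range _ _ (2 * j) _ (by omega),
                PySem.List.getD_map_range _ _ (2 * j) _ (by omega),
                PySem.List.getD_map_range _ _ (2 * j + 1) _ (by omega),
                PySem.List.getD_map_range _ _ (2 * j + 1) _ (by omega),
                Nat.mul_comm 2 i, Nat.mul_comm 2 j]
            ring
          · rw [List.getElem_append_right (by simpa using hj), if_neg hj]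
            simp
      · rw [List.getElem_append_right (by simpa using hi), if_neg hi]
        simp
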